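-- pv_equiv track=rewrite | github.com/i-shaan/lost-found | ai-services/services/advanced_matching_service.py | are_similar_colors
-- ===== SOURCE A (Python) =====
-- def are_similar_colors(color1: str, color2: str) -> bool:
--     """Check if two colors are similar"""
--     color_groups = {
--         'dark': ['black', 'dark', 'navy', 'maroon', 'brown'],
--         'light': ['white', 'light', 'cream', 'beige', 'silver'],
--         'warm': ['red', 'orange', 'yellow', 'pink'],
--         'cool': ['blue', 'green', 'purple', 'cyan'],
--         'neutral': ['brown', 'gray', 'grey', 'silver', 'tan']
--     }
--
--     for group, colors in color_groups.items():
--         if color1 in colors and color2 in colors: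
--             return True
--     return False
-- ===== SOURCE B (Python) =====
-- # B encodes group membership as a precomputed bitmask per color (dark=1, light=2,
-- # warm=4, cool=8, neutral=16); similarity = nonzero bitwise AND of the two masks.
-- _COLOR_MASK = {
--     'black': 1, 'dark': 1, 'navy': 1, 'maroon': 1, 'brown': 1 | 16,
--     'white': 2, 'light': 2, 'cream': 2, 'beige': 2, 'silver': 2 | 16,
--     'red': 4, 'orange': 4, 'yellow': 4, 'pink': 4,
--     'blue': 8, 'green': 8, 'purple': 8, 'cyan': 8,
--     'gray': 16, 'grey': 16, 'tan': 16,
-- }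
--
--
-- def are_similar_colors(color1: str, color2: str) -> bool:
--     """Check if two colors are similar"""
--     return (_COLOR_MASK.get(color1, 0) & _COLOR_MASK.get(color2, 0)) != 0
-- ===== Notes on version B (the rewrite author's own statement) =====
-- stated objective: alternative
-- what changed: B replaces A's scan of every group's member list for both colors by a precomputed color-to-bitmask table (one bit per group) and answers each query as a nonzero bitwise AND of the two looked-up masks.
import Mathlib
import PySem

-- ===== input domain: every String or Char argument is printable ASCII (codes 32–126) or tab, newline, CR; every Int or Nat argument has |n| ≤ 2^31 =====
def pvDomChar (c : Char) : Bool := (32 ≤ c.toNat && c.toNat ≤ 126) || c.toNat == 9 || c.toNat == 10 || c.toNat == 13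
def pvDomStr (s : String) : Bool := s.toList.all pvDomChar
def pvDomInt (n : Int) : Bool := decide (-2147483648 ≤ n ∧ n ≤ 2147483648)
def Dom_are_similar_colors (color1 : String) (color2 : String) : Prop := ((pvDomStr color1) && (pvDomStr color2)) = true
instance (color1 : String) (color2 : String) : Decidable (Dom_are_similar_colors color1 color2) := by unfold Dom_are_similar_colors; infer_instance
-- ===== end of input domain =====

-- B replaces A's per-query scan of every group for both colors by a precomputed
-- color→bitmask table (one bit per group) and a nonzero bitwise AND test
-- (objective: alternative; proved here: same return value on all inputs).

-- ===== PORT A =====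
-- the literal dict of color groups, iterated in insertion order
def pvColorGroups : List (String × List String) :=
  [("dark", ["black", "dark", "navy", "maroon", "brown"]),
   ("light", ["white", "light", "cream", "beige", "silver"]),
   ("warm", ["red", "orange", "yellow", "pink"]),
   ("cool", ["blue", "green", "purple", "cyan"]),
   ("neutral", ["brown", "gray", "grey", "silver", "tan"])]

-- A's loop 'for group, colors in …: if color1 in colors and color2 in colors: return True'
def are_similar_colors (color1 : String) (color2 : String) : Bool :=
  pvColorGroups.any (fun gc => gc.2.contains color1 && gc.2.contains color2)

-- ===== PORT B =====
-- Source B's literal mask table: bit 1 = dark, 2 = light, 4 = warm, 8 = cool, 16 = neutral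
def pvColorMask : PySem.Dict String Nat :=
  PySem.Dict.mk
  [("black", 1), ("dark", 1), ("navy", 1), ("maroon", 1), ("brown", 17),
   ("white", 2), ("light", 2), ("cream", 2), ("beige", 2), ("silver", 18),
   ("red", 4), ("orange", 4), ("yellow", 4), ("pink", 4),
   ("blue", 8), ("green", 8), ("purple", 8), ("cyan", 8),
   ("gray", 16), ("grey", 16), ("tan", 16)]

-- Source B: (_COLOR_MASK.get(color1, 0) & _COLOR_MASK.get(color2, 0)) != 0
def are_similar_colors_alt (color1 : String) (color2 : String) : Bool :=
  decide ((pvColorMask.getD color1 0) &&& (pvColorMask.getD color2 0) ≠ 0)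

-- ===== PRECONDITION & SPEC =====
def Spec_are_similar_colors (color1 : String) (color2 : String) (out : Bool) : Prop := out = are_similar_colors_alt color1 color2
instance (color1 : String) (color2 : String) (out : Bool) : Decidable (Spec_are_similar_colors color1 color2 out) := by unfold Spec_are_similar_colors; infer_instance

-- ===== CLAIM =====
def Claim_equal_are_similar_colors : Prop := ∀ (color1 : String) (color2 : String), Dom_are_similar_colors color1 color2 → Spec_are_similar_colors color1 color2 (are_similar_colors color1 color2)

-- ===== LEMMAS AND PROOFS =====
-- all colors mentioned anywhere (the mask table's keys)
def pvAllColors : List String :=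
  ["black","dark","navy","maroon","brown","white","light","cream","beige","silver",
   "red","orange","yellow","pink","blue","green","purple","cyan","gray","grey","tan"]

-- a color outside every group makes A's scan fail
lemma A_out (c1 c2 : String) (h : c1 ∉ pvAllColors ∨ c2 ∉ pvAllColors) :
    are_similar_colors c1 c2 = false := by
  simp only [pvAllColors, List.mem_cons, List.not_mem_nil] at h
  simp only [are_similar_colors, pvColorGroups, List.any_cons, List.any_nil,
    List.contains_cons, List.contains_nil]
  rcases h with h | h <;> simp_all

-- a color outside the mask table looks up to mask 0, so B's AND is 0
lemma getD_out (c : String) (h : c ∉ pvAllColors) :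
    pvColorMask.getD c 0 = 0 := by
  have hn : pvColorMask.get? c = none := by
    rw [PySem.Dict.get?_eq_none_iff_not_mem_keys]
    simpa [pvColorMask, pvAllColors] using h
  simp [PySem.Dict.getD, hn]

lemma B_out (c1 c2 : String) (h : c1 ∉ pvAllColors ∨ c2 ∉ pvAllColors) :
    are_similar_colors_alt c1 c2 = false := by
  simp only [are_similar_colors_alt]
  rcases h with h | h <;> rw [getD_out _ h] <;> simp

-- ===== VERDICT =====
theorem are_similar_colors_spec : Claim_equal_are_similar_colors := by
  intro c1 c2 _
  unfold Spec_are_similar_colors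
  by_cases h1 : c1 ∈ pvAllColors
  · by_cases h2 : c2 ∈ pvAllColors
    · fin_cases h1 <;> fin_cases h2 <;> decide
    · rw [A_out c1 c2 (Or.inr h2), B_out c1 c2 (Or.inr h2)]
  · rw [A_out c1 c2 (Or.inl h1), B_out c1 c2 (Or.inl h1)]
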